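-- pv_equiv track=rewrite | github.com/luizrennocosta/comp1ufrj | listas/lista1/submissions/123658093_lista1.py | questao3
-- ===== SOURCE A (Python) =====
-- def questao3(a, b):
--     frequencia_a = {}
--
--     for letra in a:
--         if letra in frequencia_a:
--             frequencia_a[letra] = frequencia_a[letra] + 1
--         else:
--             frequencia_a[letra] = 1
--
--     total_exclusoes = 0
--
--     for letra in b:
--         if letra in frequencia_a and frequencia_a[letra] > 0:
--             frequencia_a[letra] = frequencia_a[letra] - 1
--         else:
--             total_exclusoes = total_exclusoes + 1
--
--     total_exclusoes = total_exclusoes + sum(frequencia_a.values())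
--
--     return total_exclusoes
-- ===== SOURCE B (Python) =====
-- def _occ(s, c):
--     n = 0
--     for ch in s:
--         if ch == c:
--             n += 1
--     return n
--
--
-- def questao3(a, b):
--     total = 0
--     for c in dict.fromkeys(a + b):
--         total += abs(_occ(a, c) - _occ(b, c))
--     return total
-- ===== Notes on version B (the rewrite author's own statement) =====
-- stated objective: simpler
-- what changed: Replaces the build-a-table-then-decrement-while-scanning-b mutation strategy with two independent per-character tallies reconciled in one absolute-difference pass over the distinct characters of a+b.
import Mathlib
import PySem

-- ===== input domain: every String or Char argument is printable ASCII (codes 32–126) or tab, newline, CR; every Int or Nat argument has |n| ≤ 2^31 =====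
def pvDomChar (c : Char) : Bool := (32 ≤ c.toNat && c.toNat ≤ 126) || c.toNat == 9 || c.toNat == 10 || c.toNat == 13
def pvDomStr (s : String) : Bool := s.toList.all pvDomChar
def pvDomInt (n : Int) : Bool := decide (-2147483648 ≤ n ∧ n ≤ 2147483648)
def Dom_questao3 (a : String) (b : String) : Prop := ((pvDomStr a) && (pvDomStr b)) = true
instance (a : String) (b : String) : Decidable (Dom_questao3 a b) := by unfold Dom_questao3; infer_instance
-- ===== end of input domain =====

-- B replaces A's single mutated frequency table (built from a, decremented while scanning b)
-- with two independent per-character tallies reconciled by one absolute-difference pass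
-- over the distinct characters of a+b: simpler decomposition, same exact results.

-- ===== PORT A =====
-- first loop: build frequencia_a from a
def pvFreqStep (d : PySem.Dict Char Int) (c : Char) : PySem.Dict Char Int :=
  match d.get? c with
  | some v => d.insert c (v + 1)      -- letra in frequencia_a: frequencia_a[letra] += 1
  | none   => d.insert c 1            -- else: frequencia_a[letra] = 1

-- second loop: scan b, decrement when possible, else count an exclusion
def pvScanStep (st : PySem.Dict Char Int × Int) (c : Char) : PySem.Dict Char Int × Int :=
  match st.1.get? c with
  | some v => if v > 0 then (st.1.insert c (v - 1), st.2) else (st.1, st.2 + 1)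
  | none   => (st.1, st.2 + 1)

def questao3 (a : String) (b : String) : Int :=
  let fa := a.toList.foldl pvFreqStep PySem.Dict.empty
  let st := b.toList.foldl pvScanStep (fa, 0)
  st.2 + st.1.values.sum

-- ===== PORT B =====
def _occ (s : String) (c : Char) : Int :=
  s.toList.foldl (fun n ch => if ch == c then n + 1 else n) 0

def questao3_alt (a : String) (b : String) : Int :=
  (PySem.List.dedup (a ++ b).toList).foldl (fun total c => total + |_occ a c - _occ b c|) 0

-- ===== PRECONDITION & SPEC =====
def Spec_questao3 (a : String) (b : String) (out : Int) : Prop := out = questao3_alt a b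
instance (a : String) (b : String) (out : Int) : Decidable (Spec_questao3 a b out) := by unfold Spec_questao3; infer_instance

-- ===== CLAIM (what is proved, stated in full; the proofs are below) =====
def Claim_equal_questao3 : Prop := ∀ (a : String) (b : String), Dom_questao3 a b → Spec_questao3 a b (questao3 a b)

-- ===== LEMMAS AND PROOFS =====

-- A's first loop is exactly the Counter loop
lemma pvFreqStep_eq : pvFreqStep = fun (d : PySem.Dict Char Int) c => d.insert c (d.getD c 0 + 1) := by
  funext d c
  unfold pvFreqStep
  cases h : d.get? c <;> simp [PySem.Dict.getD, h]

lemma pvFreq_eq_counter (l : List Char) :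
    l.foldl pvFreqStep PySem.Dict.empty = PySem.Dict.counter l := by
  rw [pvFreqStep_eq, PySem.Dict.foldl_insert_getD_add_one_eq_counter]

-- sum over a superlist U of the keys equals the sum of the dict's values
lemma pvSumValues (d : PySem.Dict Char Int) (U : List Char)
    (hU : U.Nodup) (hkU : ∀ k ∈ d.keys, k ∈ U) (hk : d.keys.Nodup) :
    (U.map (fun c => d.getD c 0)).sum = d.values.sum := by
  rw [PySem.Dict.values_eq_map_keys d hk 0]
  rw [← List.sum_toFinset _ hU, ← List.sum_toFinset _ hk]
  refine (Finset.sum_subset ?_ ?_).symm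
  · intro x hx
    simp only [List.mem_toFinset] at hx ⊢
    exact hkU x hx
  · intro x _ hx
    simp only [List.mem_toFinset] at hx
    have h0 : d.get? x = none := (PySem.Dict.get?_eq_none_iff_not_mem_keys d x).mpr hx
    simp [PySem.Dict.getD, h0]

-- a sum whose terms differ only at c
lemma pvSumDiff (f g : Char → Int) (U : List Char) (c : Char)
    (h : ∀ x, x ≠ c → f x = g x) :
    (U.map f).sum = (U.map g).sum + (U.count c : Int) * (f c - g c) := by
  induction U with
  | nil => simp
  | cons u U ih =>
    rcases eq_or_ne u c with rfl | hu
    · rw [List.map_cons, List.map_cons, List.sum_cons, List.sum_cons,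
        List.count_cons_self, ih]
      push_cast
      ring
    · rw [List.map_cons, List.map_cons, List.sum_cons, List.sum_cons,
        List.count_cons_of_ne hu, ih, h u hu]
      ring

-- the one changed term at an exhausted/absent character
lemma pvAbsSucc (n : Int) (hn : 0 ≤ n) : |(0 : Int) - (n + 1)| = |(0 : Int) - n| + 1 := by
  rw [abs_of_nonpos (by omega), abs_of_nonpos (by omega)]
  ring

-- invariant for A's second loop
lemma pvScan (l : List Char) (d : PySem.Dict Char Int) (t : Int) (U : List Char)
    (hU : U.Nodup) (hkU : ∀ k ∈ d.keys, k ∈ U) (hlU : ∀ c ∈ l, c ∈ U)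
    (hk : d.keys.Nodup) (hpos : ∀ c, 0 ≤ d.getD c 0) :
    (l.foldl pvScanStep (d, t)).2 + (l.foldl pvScanStep (d, t)).1.values.sum
      = t + (U.map (fun c => |d.getD c 0 - (l.count c : Int)|)).sum := by
  induction l generalizing d t with
  | nil =>
    simp only [List.foldl_nil, List.count_nil]
    rw [← pvSumValues d U hU hkU hk]
    have : ∀ c ∈ U, |d.getD c 0 - ((0 : Nat) : Int)| = d.getD c 0 := by
      intro c _
      simpa using abs_of_nonneg (hpos c)
    rw [List.map_congr_left this]
  | cons c l ih =>
    have hcU : c ∈ U := hlU c (List.mem_cons_self ..)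
    have hlU' : ∀ x ∈ l, x ∈ U := fun x hx => hlU x (List.mem_cons_of_mem _ hx)
    rw [List.foldl_cons]
    cases hgc : d.get? c with
    | some v =>
      have hvD : d.getD c 0 = v := by simp [PySem.Dict.getD, hgc]
      by_cases hv : v > 0
      · have hstep : pvScanStep (d, t) c = (d.insert c (v - 1), t) := by
          simp [pvScanStep, hgc, hv]
        have hcont : d.contains c = true := by
          rw [PySem.Dict.contains_eq_isSome_get?, hgc]
          rfl
        have hkeys : (d.insert c (v - 1)).keys = d.keys :=
          PySem.Dict.keys_insert_of_contains d (v - 1) hcont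
        rw [hstep, ih (d.insert c (v - 1)) t
            (fun k hkk => hkU k (hkeys ▸ hkk)) hlU'
            (hkeys ▸ hk)
            (fun x => by
              rw [PySem.Dict.getD_insert]
              split_ifs with hxc
              · omega
              · exact hpos x)]
        refine congrArg (t + ·) (congrArg List.sum (List.map_congr_left fun x _ => ?_))
        rw [PySem.Dict.getD_insert]
        split_ifs with hxc
        · subst hxc
          rw [hvD, List.count_cons_self]
          congr 1
          push_cast
          ring
        · rw [List.count_cons_of_ne (Ne.symm hxc)]
      · have hstep : pvScanStep (d, t) c = (d, t + 1) := by
          simp [pvScanStep, hgc, hv]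
        rw [hstep, ih d (t + 1) hkU hlU' hk hpos]
        have hv0 : d.getD c 0 = 0 := by have := hpos c; omega
        rw [pvSumDiff (fun x => |d.getD x 0 - ((c :: l).count x : Int)|)
            (fun x => |d.getD x 0 - (l.count x : Int)|) U c
            (fun x hxc => by simp only [List.count_cons_of_ne (Ne.symm hxc)])]
        simp only [List.count_cons_self, hv0]
        rw [List.count_eq_one_of_mem hU hcU]
        push_cast
        rw [pvAbsSucc _ (by positivity)]
        ring
    | none =>
      have hstep : pvScanStep (d, t) c = (d, t + 1) := by
        simp [pvScanStep, hgc]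
      rw [hstep, ih d (t + 1) hkU hlU' hk hpos]
      have hv0 : d.getD c 0 = 0 := by simp [PySem.Dict.getD, hgc]
      rw [pvSumDiff (fun x => |d.getD x 0 - ((c :: l).count x : Int)|)
          (fun x => |d.getD x 0 - (l.count x : Int)|) U c
          (fun x hxc => by simp only [List.count_cons_of_ne (Ne.symm hxc)])]
      simp only [List.count_cons_self, hv0]
      rw [List.count_eq_one_of_mem hU hcU]
      push_cast
      rw [pvAbsSucc _ (by positivity)]
      ring

lemma pvOcc_eq (s : String) (c : Char) : _occ s c = (s.toList.count c : Int) := by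
  unfold _occ
  rw [PySem.List.foldl_beq_add_one]
  ring

-- ===== VERDICT (by name: the statement is the Claim_ definition above) =====
theorem questao3_spec : Claim_equal_questao3 := by
  intro a b _
  unfold Spec_questao3 questao3 questao3_alt
  simp only []
  rw [pvFreq_eq_counter]
  set U := PySem.List.dedup (a ++ b).toList with hUdef
  have hab : (a ++ b).toList = a.toList ++ b.toList := by simp
  have hU : U.Nodup := PySem.List.nodup_dedup _
  have hmemU : ∀ x, x ∈ U ↔ x ∈ a.toList ++ b.toList := by
    intro x
    rw [hUdef, hab]
    exact PySem.List.mem_dedup _ x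
  rw [pvScan b.toList (PySem.Dict.counter a.toList) 0 U hU
      (fun k hkk => by
        rw [PySem.Dict.keys_counter] at hkk
        rw [hmemU]
        simp only [List.mem_append]
        exact Or.inl ((PySem.Set.mem_ofList _ k).mp hkk))
      (fun c hc => (hmemU c).mpr (List.mem_append.mpr (Or.inr hc)))
      (PySem.Dict.nodup_keys_counter _)
      (fun c => by rw [PySem.Dict.getD_counter]; positivity)]
  rw [PySem.List.foldl_add]
  simp only [PySem.Dict.getD_counter, pvOcc_eq]
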